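-- pv_equiv track=rewrite | github.com/adeelahmad/mlx-grpo-trainer | src/mlx_rl_trainer/utils/text_utils.py | _letters_to_canonical
-- ===== SOURCE A (Python) =====
-- import string
--
-- LETTER_ALPH = string.ascii_uppercase
--
-- def _letters_to_canonical(letter_str: str) -> str:
--     """Converts a string of letters (e.g., 'a, B ,d') to canonical uppercase form ('A,B,D')."""
--     parts = []
--     for p in (letter_str or "").split(","):
--         p = p.strip().upper()
--         if len(p) == 1 and p in LETTER_ALPH:
--             parts.append(p)
--     seen, out = set(), []
--     for L in sorted(parts):
--         if L not in seen:
--             seen.add(L)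
--             out.append(L)
--     return ",".join(out)
-- ===== SOURCE B (Python) =====
-- import string
--
-- LETTER_ALPH = string.ascii_uppercase
--
-- def _letters_to_canonical(letter_str: str) -> str:
--     present = {p.strip().upper() for p in (letter_str or "").split(",")}
--     return ",".join(L for L in LETTER_ALPH if L in present)
-- ===== Notes on version B (the rewrite author's own statement) =====
-- stated objective: alternative
-- what changed: Instead of collecting valid tokens, sorting them and deduplicating with a seen-set, B builds one set of normalized tokens and emits the output by scanning the fixed 26-letter alphabet in order (counting-sort-style), eliminating the sort and the dedup loop.
import Mathlib
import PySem

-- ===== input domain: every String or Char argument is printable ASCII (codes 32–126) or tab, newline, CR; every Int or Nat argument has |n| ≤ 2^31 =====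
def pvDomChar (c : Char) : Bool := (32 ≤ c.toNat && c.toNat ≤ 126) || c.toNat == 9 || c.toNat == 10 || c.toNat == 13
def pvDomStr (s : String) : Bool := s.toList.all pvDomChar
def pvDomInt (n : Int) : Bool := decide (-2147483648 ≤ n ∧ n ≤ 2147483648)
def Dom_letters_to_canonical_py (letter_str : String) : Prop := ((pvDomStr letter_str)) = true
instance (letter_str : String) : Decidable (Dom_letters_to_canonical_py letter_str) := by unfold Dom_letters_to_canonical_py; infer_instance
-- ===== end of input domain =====

-- B replaces A's sort-then-dedup of the valid tokens by one set of normalized tokens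
-- plus an in-order scan of the fixed 26-letter alphabet (no sort, no dedup loop).

-- ===== PORT A =====
-- LETTER_ALPH = string.ascii_uppercase
def pvLETTER_ALPH : String := "ABCDEFGHIJKLMNOPQRSTUVWXYZ"

def letters_to_canonical_py (letter_str : String) : String :=
  -- '(letter_str or "")' is letter_str itself: the only falsy str is "", and 'or' then yields ""
  let parts : List String :=
    ((PySem.Str.split? letter_str ",").getD []).foldl
      (fun acc p =>
        let q := PySem.Str.upper (PySem.Str.strip p)
        if PySem.Str.len q == 1 && PySem.Str.isIn q pvLETTER_ALPH then acc ++ [q] else acc) []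
  let r :=
    (PySem.List.sorted parts (fun x => x) false).foldl
      (fun (st : PySem.Set String × List String) L =>
        if PySem.Set.contains st.1 L then st else (PySem.Set.add st.1 L, st.2 ++ [L]))
      (PySem.Set.empty, [])
  PySem.Str.join "," r.2

-- ===== PORT B =====
-- iterating the string LETTER_ALPH yields its single-character strings, in order
def pvAlphLetters : List String := (String.toList pvLETTER_ALPH).map (fun c => String.ofList [c])

def letters_to_canonical_py_alt (letter_str : String) : String :=
  let present : PySem.Set String :=
    PySem.Set.ofList
      (((PySem.Str.split? letter_str ",").getD []).map
        (fun p => PySem.Str.upper (PySem.Str.strip p)))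
  PySem.Str.join "," (pvAlphLetters.filter (fun L => PySem.Set.contains present L))

-- ===== PRECONDITION & SPEC =====
def Spec_letters_to_canonical_py (letter_str : String) (out : String) : Prop := out = letters_to_canonical_py_alt letter_str
instance (letter_str : String) (out : String) : Decidable (Spec_letters_to_canonical_py letter_str out) := by unfold Spec_letters_to_canonical_py; infer_instance

-- ===== CLAIM (what is proved, stated in full; the proofs are below) =====
def Claim_equal_letters_to_canonical_py : Prop := ∀ (letter_str : String), Dom_letters_to_canonical_py letter_str → Spec_letters_to_canonical_py letter_str (letters_to_canonical_py letter_str)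

-- ===== LEMMAS AND PROOFS =====

-- A's token loop is filter-then-map of the normalizer over the split pieces
theorem pv_tokens {α β : Type} (U : α → β) (v : β → Bool) (toks : List α) :
    toks.foldl (fun acc p => if v (U p) then acc ++ [U p] else acc) [] =
      (toks.map U).filter v := by
  rw [PySem.List.foldl_append_if (p := fun x => v (U x)) (f := U)]
  simp [List.filter_map, Function.comp_def]

-- set(xs) keeps a subsequence of xs
theorem pv_ofList_sublist {α : Type} [BEq α] [LawfulBEq α] (xs : List α) :
    List.Sublist (PySem.Set.ofList xs) xs := by
  induction xs using List.reverseRecOn with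
  | nil => simp [PySem.Set.ofList_nil]
  | append_singleton l a ih =>
      rw [PySem.Set.ofList_append_singleton, PySem.Set.add_eq_ite]
      split
      · exact ih.trans (List.sublist_append_left l [a])
      · exact ih.append (List.Sublist.refl [a])

-- A's dedup loop keeps 'seen' and 'out' equal: starting from equal components it
-- computes the set-update of the start by the traversed elements, in both components
theorem pv_dedup_loop (l : List String) (s : PySem.Set String) :
    l.foldl
      (fun (st : PySem.Set String × List String) L =>
        if PySem.Set.contains st.1 L then st else (PySem.Set.add st.1 L, st.2 ++ [L]))
      (s, s) = (PySem.Set.update s l, PySem.Set.update s l) := by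
  induction l generalizing s with
  | nil => simp [PySem.Set.update_nil]
  | cons a t ih =>
      rw [List.foldl_cons, PySem.Set.update_cons]
      by_cases h : a ∈ s
      · have hc : PySem.Set.contains s a = true := by
          simp [PySem.Set.contains_eq_listContains, h]
        simp only [hc, if_true]
        rw [PySem.Set.add_of_mem h]
        exact ih s
      · have hc : PySem.Set.contains s a = false := by
          simp [PySem.Set.contains_eq_listContains, h]
        simp only [hc, Bool.false_eq_true, if_false]
        rw [PySem.Set.add_of_not_mem h]
        exact ih (s ++ [a])

theorem pv_update_nil_eq_ofList (l : List String) :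
    PySem.Set.update ([] : PySem.Set String) l = PySem.Set.ofList l := by
  rw [PySem.Set.ofList_eq_foldl]; rfl

-- a valid normalized token is one of the 26 single-letter strings
theorem pv_valid_mem_alph (q : String)
    (h : (PySem.Str.len q == 1 && PySem.Str.isIn q pvLETTER_ALPH) = true) :
    q ∈ pvAlphLetters := by
  rw [Bool.and_eq_true] at h
  obtain ⟨h1, h2⟩ := h
  have hlen : q.toList.length = 1 := by
    have := PySem.Str.len_eq q
    rw [beq_iff_eq, this] at h1
    exact_mod_cast h1
  obtain ⟨c, hc⟩ := List.length_eq_one_iff.mp hlen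
  rw [PySem.Str.isIn_iff_infix, hc] at h2
  have hcm : c ∈ pvLETTER_ALPH.toList := List.singleton_sublist.mp h2.sublist
  have : q = String.ofList [c] := by rw [← hc, String.ofList_toList]
  rw [this, pvAlphLetters]
  exact List.mem_map_of_mem hcm

theorem pv_alph_pairwise_le : pvAlphLetters.Pairwise (· ≤ ·) := by
  simp only [pvAlphLetters, String.le_iff_toList_le]
  decide

theorem pv_alph_nodup : pvAlphLetters.Nodup := by decide

-- main list lemma: dedup-of-sorted of a sublist of the alphabet letters equals
-- the alphabet filtered by membership
theorem pv_sorted_dedup_eq_filter (parts : List String)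
    (hsub : ∀ p ∈ parts, p ∈ pvAlphLetters) :
    PySem.Set.ofList (PySem.List.sorted parts (fun x => x) false) =
      pvAlphLetters.filter (fun L => decide (L ∈ parts)) := by
  have hnl : (PySem.Set.ofList (PySem.List.sorted parts (fun x => x) false)).Nodup :=
    PySem.Set.nodup_ofList _
  have hnr : (pvAlphLetters.filter (fun L => decide (L ∈ parts))).Nodup :=
    pv_alph_nodup.filter _
  have hperm : (PySem.Set.ofList (PySem.List.sorted parts (fun x => x) false)).Perm
      (pvAlphLetters.filter (fun L => decide (L ∈ parts))) := by
    rw [List.perm_ext_iff_of_nodup hnl hnr]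
    intro x
    rw [PySem.Set.mem_ofList, PySem.List.mem_sorted, List.mem_filter]
    constructor
    · intro hx; exact ⟨hsub x hx, by simpa using hx⟩
    · intro hx; simpa using hx.2
  refine List.Perm.eq_of_pairwise (le := (· ≤ ·))
    (fun a b _ _ h1 h2 => le_antisymm h1 h2) ?_ ?_ hperm
  · exact List.Pairwise.sublist (pv_ofList_sublist _)
      (PySem.List.sorted_pairwise parts (fun x => x))
  · exact List.Pairwise.sublist List.filter_sublist pv_alph_pairwise_le

theorem pv_alph_valid : ∀ L ∈ pvAlphLetters,
    (PySem.Str.len L == 1 && PySem.Str.isIn L pvLETTER_ALPH) = true := by decide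

theorem letters_to_canonical_py_spec_aux (letter_str : String) :
    letters_to_canonical_py letter_str = letters_to_canonical_py_alt letter_str := by
  unfold letters_to_canonical_py letters_to_canonical_py_alt
  simp only
  rw [pv_tokens (U := fun p => PySem.Str.upper (PySem.Str.strip p))
        (v := fun q => PySem.Str.len q == 1 && PySem.Str.isIn q pvLETTER_ALPH)]
  rw [show (PySem.Set.empty : PySem.Set String) = ([] : List String) from rfl]
  rw [pv_dedup_loop, pv_update_nil_eq_ofList]
  rw [pv_sorted_dedup_eq_filter _ (fun p hp => pv_valid_mem_alph p ((List.mem_filter.mp hp).2))]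
  congr 1
  apply List.filter_congr
  intro L hL
  have hv := pv_alph_valid L hL
  simp only [PySem.Set.contains_eq_listContains, List.mem_filter, hv, and_true]
  rw [Bool.eq_iff_iff]
  simp [PySem.Set.mem_ofList]

-- ===== VERDICT (by name: the statement is the Claim_ definition above) =====
theorem letters_to_canonical_py_spec : Claim_equal_letters_to_canonical_py := by
  intro s _
  exact letters_to_canonical_py_spec_aux s
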